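-- pv_equiv track=rewrite | github.com/mmastrac/blaze | examples/dump_font.py | render_to_bitmap
-- ===== SOURCE A (Python) =====
-- def render_to_bitmap(data, bits_top_is_msb=False):
--     """
--     Interpret `data` as N chunks of 256 bytes.
--     Each byte => vertical column of 8 pixels.
--     Returns a 2D list of 0/255 with shape (height, 256).
--     """
--     if len(data) % 256 != 0:
--         # Trim trailing partial chunk (common with raw dumps)
--         data = data[: len(data) // 256 * 256]
--
--     n_chunks = len(data) // 256
--     width, height = 256, 8 * n_chunks
--     img = [[0]*width for _ in range(height)]
--
--     for chunk_idx in range(n_chunks):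
--         base = chunk_idx * 256
--         for x in range(256):
--             b = data[base + x]
--             # Row 0 is the top of this 8-line band
--             row_base = chunk_idx * 8
--             for bit in range(8):
--                 if bits_top_is_msb:
--                     val = (b >> (7 - bit)) & 1
--                 else:
--                     val = (b >> bit) & 1
--                 img[row_base + bit][x] = 255 if val else 0
--     return img, width, height
-- ===== SOURCE B (Python) =====
-- def render_to_bitmap(data, bits_top_is_msb=False):
--     """Bit-plane extraction: per 256-byte chunk, peel the 8 rows off by
--     successive halving (v & 1 then v >>= 1), then flip the 8-row band for
--     MSB-on-top order.  No per-pixel shift counts or row/bit index math."""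
--     img = []
--     for c in range(len(data) // 256):
--         cur = data[c * 256:(c + 1) * 256]
--         band = []
--         for _ in range(8):
--             band.append([255 if v & 1 else 0 for v in cur])
--             cur = [v >> 1 for v in cur]
--         if bits_top_is_msb:
--             band.reverse()
--         img += band
--     return img, 256, len(img)
-- ===== Notes on version B (the rewrite author's own statement) =====
-- stated objective: alternative
-- what changed: B replaces A's per-pixel bit indexing (triple chunk/column/bit loop writing 255*((b>>shift)&1) into a preallocated zero image) by bit-plane peeling: per 256-byte chunk it builds the 8 rows by repeatedly masking the low bit (v & 1) and halving the whole column list (v >> 1), then reverses the 8-row band for MSB-on-top order and extends the image band by band; no zero image, no shift counts, no row/bit index arithmetic.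
import Mathlib
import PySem

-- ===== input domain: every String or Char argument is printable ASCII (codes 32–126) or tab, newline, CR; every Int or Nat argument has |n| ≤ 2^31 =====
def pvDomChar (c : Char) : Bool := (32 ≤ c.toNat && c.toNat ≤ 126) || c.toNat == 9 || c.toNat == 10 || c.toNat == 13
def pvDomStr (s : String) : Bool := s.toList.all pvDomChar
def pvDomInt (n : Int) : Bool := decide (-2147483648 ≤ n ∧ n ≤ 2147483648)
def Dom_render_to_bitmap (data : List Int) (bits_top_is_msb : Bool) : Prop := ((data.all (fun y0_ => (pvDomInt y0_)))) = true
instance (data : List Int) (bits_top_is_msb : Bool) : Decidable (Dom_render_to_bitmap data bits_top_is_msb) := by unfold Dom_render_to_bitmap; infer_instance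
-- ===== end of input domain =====

-- B extracts each 8-row band by bit-plane peeling (mask & halve, then flip the band for MSB order) instead of A's per-pixel shift writes; return value proved equal to A's.

-- ===== PORT A =====
-- literal port of A: trim partial chunk, allocate zero image, triple loop
-- (chunk, column x, bit) mutating img[row_base+bit][x].  Indices are
-- manifestly nonnegative and in range, so Nat indexing (getD/set) is exact.
-- pvChunkBody is the body of A's `for chunk_idx in range(n_chunks)` loop,
-- named so the proofs can speak about one chunk step.
def pvChunkBody (data : List Int) (bits_top_is_msb : Bool)
    (img : List (List Int)) (chunk_idx : Nat) : List (List Int) :=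
  let base := chunk_idx * 256
  (List.range 256).foldl (fun img x =>
    let b := data.getD (base + x) 0
    let row_base := chunk_idx * 8
    (List.range 8).foldl (fun img (bit : Nat) =>
      let val := if bits_top_is_msb then PySem.Int.band (b >>> (7 - bit)) 1
                 else PySem.Int.band (b >>> bit) 1
      img.set (row_base + bit) ((img.getD (row_base + bit) []).set x (if val ≠ 0 then 255 else 0))
    ) img
  ) img

def render_to_bitmap (data : List Int) (bits_top_is_msb : Bool) : List (List Int) × Int × Int :=
  let data := if data.length % 256 ≠ 0 then
      PySem.List.slice data none (some ((data.length / 256 * 256 : Nat) : Int))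
    else data
  let n_chunks := data.length / 256
  let width : Nat := 256
  let height : Nat := 8 * n_chunks
  let img : List (List Int) := List.replicate height (List.replicate width (0 : Int))
  let img := (List.range n_chunks).foldl (pvChunkBody data bits_top_is_msb) img
  (img, (width : Int), (height : Int))

-- ===== PORT B =====
-- literal port of Source B: per chunk, peel 8 bit-plane rows off by successive
-- halving (`v & 1` row, then `v >> 1`), reverse the band for MSB order,
-- and extend the image band by band.
-- pvPx is Source B's `255 if v & 1 else 0`; pvBandStep is one iteration of its
-- `for _ in range(8)` loop over the state (cur, band).
def pvPx (v : Int) : Int := if PySem.Int.band v 1 ≠ 0 then 255 else 0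

def pvBandStep (st : List Int × List (List Int)) (_i : Nat) : List Int × List (List Int) :=
  (st.1.map (fun v : Int => v >>> (1 : Nat)), st.2 ++ [st.1.map pvPx])

def render_to_bitmap_alt (data : List Int) (bits_top_is_msb : Bool) : List (List Int) × Int × Int :=
  let img := (List.range (data.length / 256)).foldl (fun img c =>
    let cur := PySem.List.slice data (some ((c * 256 : Nat) : Int)) (some (((c + 1) * 256 : Nat) : Int))
    let band := ((List.range 8).foldl pvBandStep (cur, [])).2
    img ++ (if bits_top_is_msb then band.reverse else band)) []
  (img, 256, (img.length : Int))

-- ===== PRECONDITION & SPEC =====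
def Spec_render_to_bitmap (data : List Int) (bits_top_is_msb : Bool) (out : List (List Int) × Int × Int) : Prop := out = render_to_bitmap_alt data bits_top_is_msb
instance (data : List Int) (bits_top_is_msb : Bool) (out : List (List Int) × Int × Int) : Decidable (Spec_render_to_bitmap data bits_top_is_msb out) := by unfold Spec_render_to_bitmap; infer_instance

-- ===== CLAIM (what is proved, stated in full; the proofs are below) =====
def Claim_equal_render_to_bitmap : Prop := ∀ (data : List Int) (bits_top_is_msb : Bool), Dom_render_to_bitmap data bits_top_is_msb → Spec_render_to_bitmap data bits_top_is_msb (render_to_bitmap data bits_top_is_msb)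

-- ===== LEMMAS AND PROOFS =====

-- the pixel value A writes for chunk c, column x, bit row `bit` (A's innermost ite)
def pvVal (d : List Int) (msb : Bool) (c x bit : Nat) : Int :=
  if (if msb then PySem.Int.band ((d.getD (c * 256 + x) 0) >>> (7 - bit)) 1
      else PySem.Int.band ((d.getD (c * 256 + x) 0) >>> bit) 1) ≠ 0
  then 255 else 0

-- an H×256 image given by a function of (row, column)
def pvGrid (H : Nat) (g : Nat → Nat → Int) : List (List Int) :=
  (List.range H).map (fun r => (List.range 256).map (g r))

-- A's single in-place write img[r][x] = v
def pvSet2 (img : List (List Int)) (r x : Nat) (v : Int) : List (List Int) :=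
  img.set r ((img.getD r []).set x v)

theorem pvGetD_map_range {α : Type} (n k : Nat) (f : Nat → α) (d : α) (hk : k < n) :
    ((List.range n).map f).getD k d = f k := by
  simp [List.getD, hk]

theorem pvSet_map_range {α : Type} (m i : Nat) (f : Nat → α) (v : α) (hi : i < m) :
    ((List.range m).map f).set i v = (List.range m).map (fun j => if j = i then v else f j) := by
  apply List.ext_getElem
  · simp
  · intro j h1 h2
    simp only [List.getElem_set, List.getElem_map, List.getElem_range] at *
    by_cases h : j = i
    · subst h; simp
    · rw [if_neg h, if_neg (fun e : i = j => h e.symm)]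

theorem pvGrid_congr (H : Nat) (g g' : Nat → Nat → Int)
    (h : ∀ r x, r < H → x < 256 → g r x = g' r x) : pvGrid H g = pvGrid H g' := by
  unfold pvGrid
  apply List.map_congr_left
  intro r hr
  apply List.map_congr_left
  intro x hx
  exact h r x (List.mem_range.mp hr) (List.mem_range.mp hx)

theorem pvSet2_grid (H : Nat) (g : Nat → Nat → Int) (r x : Nat) (v : Int)
    (hr : r < H) (hx : x < 256) :
    pvSet2 (pvGrid H g) r x v
      = pvGrid H (fun r' x' => if r' = r ∧ x' = x then v else g r' x') := by
  unfold pvSet2 pvGrid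
  rw [pvGetD_map_range H r _ _ hr, pvSet_map_range 256 x _ _ hx, pvSet_map_range H r _ _ hr]
  apply List.map_congr_left
  intro r' hr'
  by_cases h : r' = r
  · subst h
    rw [if_pos rfl]
    apply List.map_congr_left
    intro x' _
    by_cases hxx : x' = x
    · simp [hxx]
    · simp [hxx]
  · simp only [if_neg h]
    apply List.map_congr_left
    intro x' _
    rw [if_neg (fun hc => h hc.1)]

theorem pvBitLoop (H : Nat) (g : Nat → Nat → Int) (c x : Nat) (w : Nat → Int)
    (hc : c * 8 + 7 < H) (hx : x < 256) (k : Nat) (hk : k ≤ 8) :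
    (List.range k).foldl (fun img bit => pvSet2 img (c * 8 + bit) x (w bit)) (pvGrid H g)
      = pvGrid H (fun r x' => if c * 8 ≤ r ∧ r < c * 8 + k ∧ x' = x then w (r - c * 8) else g r x') := by
  induction k with
  | zero =>
      simp only [List.range_zero, List.foldl_nil]
      apply pvGrid_congr
      intro r x' _ _
      rw [if_neg (by omega)]
  | succ k ih =>
      rw [List.range_succ, List.foldl_append, ih (by omega), List.foldl_cons, List.foldl_nil,
        pvSet2_grid H _ (c * 8 + k) x (w k) (by omega) hx]
      apply pvGrid_congr
      intro r x' _ _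
      by_cases h1 : r = c * 8 + k ∧ x' = x
      · obtain ⟨h1a, h1b⟩ := h1
        subst h1a h1b
        rw [if_pos ⟨rfl, rfl⟩, if_pos ⟨by omega, by omega, rfl⟩]
        congr 1
        omega
      · rw [if_neg h1]
        by_cases h2 : c * 8 ≤ r ∧ r < c * 8 + k ∧ x' = x
        · rw [if_pos h2, if_pos ⟨h2.1, by omega, h2.2.2⟩]
        · rw [if_neg h2, if_neg (by rw [not_and_or] at h1 h2; omega)]

theorem pvXLoop (H : Nat) (g : Nat → Nat → Int) (c : Nat) (w : Nat → Nat → Int)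
    (hc : c * 8 + 7 < H) (k : Nat) (hk : k ≤ 256) :
    (List.range k).foldl (fun img x =>
        (List.range 8).foldl (fun img bit => pvSet2 img (c * 8 + bit) x (w x bit)) img) (pvGrid H g)
      = pvGrid H (fun r x' => if c * 8 ≤ r ∧ r < c * 8 + 8 ∧ x' < k then w x' (r - c * 8) else g r x') := by
  induction k with
  | zero =>
      simp only [List.range_zero, List.foldl_nil]
      apply pvGrid_congr
      intro r x' _ _
      rw [if_neg (by omega)]
  | succ k ih =>
      rw [show List.range (k+1) = List.range k ++ [k] from List.range_succ,
        List.foldl_append, ih (by omega), List.foldl_cons, List.foldl_nil,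
        pvBitLoop H _ c k _ hc (by omega) 8 (le_refl 8)]
      apply pvGrid_congr
      intro r x' _ _
      by_cases h1 : c * 8 ≤ r ∧ r < c * 8 + 8 ∧ x' = k
      · obtain ⟨h1a, h1b, h1c⟩ := h1
        subst h1c
        rw [if_pos ⟨h1a, h1b, rfl⟩, if_pos ⟨h1a, h1b, by omega⟩]
      · rw [if_neg h1]
        by_cases h2 : c * 8 ≤ r ∧ r < c * 8 + 8 ∧ x' < k
        · rw [if_pos h2, if_pos ⟨h2.1, h2.2.1, by omega⟩]
        · rw [if_neg h2, if_neg (by rw [not_and_or] at h1 h2; omega)]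

theorem pvChunkLoop (d : List Int) (msb : Bool) (n k : Nat) (hk : k ≤ n) :
    (List.range k).foldl (pvChunkBody d msb) (pvGrid (8 * n) (fun _ _ => 0))
      = pvGrid (8 * n) (fun r x => if r < 8 * k then pvVal d msb (r / 8) x (r % 8) else 0) := by
  have hbody : pvChunkBody d msb = fun img c =>
      (List.range 256).foldl (fun img x =>
        (List.range 8).foldl (fun img (bit : Nat) =>
          pvSet2 img (c * 8 + bit) x (pvVal d msb c x bit)) img) img := rfl
  rw [hbody]
  induction k with
  | zero =>
      simp only [List.range_zero, List.foldl_nil]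
      apply pvGrid_congr
      intro r x _ _
      rw [if_neg (by omega)]
  | succ k ih =>
      rw [show List.range (k+1) = List.range k ++ [k] from List.range_succ,
        List.foldl_append, ih (by omega), List.foldl_cons, List.foldl_nil,
        pvXLoop (8 * n) _ k _ (by omega) 256 (le_refl 256)]
      apply pvGrid_congr
      intro r x hr hx
      by_cases h1 : k * 8 ≤ r ∧ r < k * 8 + 8 ∧ x < 256
      · rw [if_pos h1, if_pos (show r < 8 * (k + 1) by omega)]
        have e1 : r / 8 = k := by omega
        have e2 : r % 8 = r - k * 8 := by omega
        rw [e1, e2]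
      · rw [if_neg h1]
        by_cases h2 : r < 8 * k
        · rw [if_pos h2, if_pos (by omega)]
        · rw [if_neg h2, if_neg (by rw [not_and_or] at h1; omega)]

-- ── B-side lemmas ──

-- the band loop: after k peeling steps the working list carries cur >> k and
-- the band holds the first k bit-plane rows
theorem pvBandFold (cur : List Int) (k : Nat) :
    (List.range k).foldl pvBandStep (cur, []) =
      (cur.map (fun v : Int => v >>> k),
       (List.range k).map (fun j : Nat => (cur.map (fun v : Int => v >>> j)).map pvPx)) := by
  induction k with
  | zero =>
      simp only [List.range_zero, List.foldl_nil, List.map_nil]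
      have h0 : (fun v : Int => v >>> (0 : Nat)) = fun v => v := by
        funext v
        cases v <;> rfl
      rw [h0, List.map_id']
  | succ k ih =>
      rw [show List.range (k + 1) = List.range k ++ [k] from List.range_succ,
        List.foldl_append, ih, List.foldl_cons, List.foldl_nil, List.map_append]
      unfold pvBandStep
      refine Prod.ext ?_ ?_
      · dsimp only
        rw [List.map_map]
        apply List.map_congr_left
        intro v _
        exact (Int.shiftRight_add v k 1).symm
      · dsimp only
        simp [List.map_cons, List.map_nil]

theorem pvTakeDrop (l : List Int) (a : Nat) (h : a + 256 ≤ l.length) :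
    (l.drop a).take 256 = (List.range 256).map (fun x => l.getD (a + x) 0) := by
  apply List.ext_getElem
  · simp; omega
  · intro i h1 h2
    simp only [List.length_take, List.length_drop] at h1
    simp only [List.getElem_take, List.getElem_drop, List.getElem_map, List.getElem_range]
    simp [List.getD, show a + i < l.length by omega]

theorem pvFlatMapCongr {α β : Type} (l : List α) (f g : α → List β)
    (h : ∀ x ∈ l, f x = g x) : l.flatMap f = l.flatMap g := by
  induction l with
  | nil => rfl
  | cons a t ih =>
      simp only [List.flatMap_cons]
      rw [h a (List.mem_cons_self), ih (fun x hx => h x (List.mem_cons_of_mem a hx))]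

-- concatenating n bands of 8 rows is the 8n-row grid indexed by (r/8, r%8)
theorem pvFlat {α : Type} (n : Nat) (g : Nat → Nat → α) :
    (List.range n).flatMap (fun c => (List.range 8).map (g c)) =
      (List.range (8 * n)).map (fun r => g (r / 8) (r % 8)) := by
  induction n with
  | zero => simp
  | succ n ih =>
      rw [show List.range (n + 1) = List.range n ++ [n] from List.range_succ,
        List.flatMap_append, ih,
        show 8 * (n + 1) = 8 * n + 8 by ring, List.range_add, List.map_append]
      congr 1
      simp only [List.flatMap_cons, List.flatMap_nil, List.append_nil, List.map_map]
      apply List.map_congr_left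
      intro j hj
      have hj8 : j < 8 := List.mem_range.mp hj
      have e1 : (8 * n + j) / 8 = n := by omega
      have e2 : (8 * n + j) % 8 = j := by omega
      simp only [Function.comp_apply, e1, e2]

-- reversing an 8-row band indexed by range 8
theorem pvRevMap8 {α : Type} (g : Nat → α) :
    ((List.range 8).map g).reverse = (List.range 8).map (fun j => g (7 - j)) := by
  simp [List.range_succ]

-- ===== VERDICT (by name: the statement is the Claim_ definition above) =====
set_option maxRecDepth 4000 in
theorem render_to_bitmap_spec : Claim_equal_render_to_bitmap := by
  intro data msb _
  unfold Spec_render_to_bitmap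
  have hm : data.length / 256 * 256 ≤ data.length := Nat.div_mul_le_self _ _
  -- ── B side: closed form of render_to_bitmap_alt ──
  have hB : render_to_bitmap_alt data msb
      = (pvGrid (8 * (data.length / 256))
          (fun r x => pvPx ((data.getD (r / 8 * 256 + x) 0) >>>
            (if msb then 7 - r % 8 else r % 8))),
         256, ((8 * (data.length / 256) : Nat) : Int)) := by
    have hband : ∀ c ∈ List.range (data.length / 256),
        (if msb then
          (((List.range 8).foldl pvBandStep
            (PySem.List.slice data (some ((c * 256 : Nat) : Int)) (some (((c + 1) * 256 : Nat) : Int)), [])).2).reverse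
        else
          ((List.range 8).foldl pvBandStep
            (PySem.List.slice data (some ((c * 256 : Nat) : Int)) (some (((c + 1) * 256 : Nat) : Int)), [])).2)
        = (List.range 8).map (fun j : Nat => (List.range 256).map (fun x =>
            pvPx ((data.getD (c * 256 + x) 0) >>> (if msb then 7 - j else j)))) := by
      intro c hc
      have hcn : c < data.length / 256 := List.mem_range.mp hc
      have hcur : PySem.List.slice data (some ((c * 256 : Nat) : Int)) (some (((c + 1) * 256 : Nat) : Int))
          = (List.range 256).map (fun x => data.getD (c * 256 + x) 0) := by
        rw [PySem.List.slice_natCast]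
        rw [show (c + 1) * 256 - c * 256 = 256 by omega]
        have hle : c * 256 + 256 ≤ data.length := by
          have h1 : (c + 1) * 256 ≤ data.length / 256 * 256 :=
            Nat.mul_le_mul_right 256 hcn
          omega
        exact pvTakeDrop data (c * 256) hle
      rw [pvBandFold, hcur]
      have hrow : ∀ j : Nat, (((List.range 256).map (fun x => data.getD (c * 256 + x) 0)).map
            (fun v : Int => v >>> j)).map pvPx
          = (List.range 256).map (fun x => pvPx ((data.getD (c * 256 + x) 0) >>> j)) := by
        intro j
        rw [List.map_map, List.map_map]
        apply List.map_congr_left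
        intro x _
        rfl
      cases msb with
      | false =>
          simp only [Bool.false_eq_true, if_false]
          apply List.map_congr_left
          intro j _
          exact hrow j
      | true =>
          simp only [if_true]
          rw [pvRevMap8]
          apply List.map_congr_left
          intro j _
          exact hrow (7 - j)
    have himg : (List.range (data.length / 256)).foldl (fun img c =>
        img ++ (if msb then
          (((List.range 8).foldl pvBandStep
            (PySem.List.slice data (some ((c * 256 : Nat) : Int)) (some (((c + 1) * 256 : Nat) : Int)), [])).2).reverse
        else
          ((List.range 8).foldl pvBandStep
            (PySem.List.slice data (some ((c * 256 : Nat) : Int)) (some (((c + 1) * 256 : Nat) : Int)), [])).2)) []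
        = pvGrid (8 * (data.length / 256))
            (fun r x => pvPx ((data.getD (r / 8 * 256 + x) 0) >>>
              (if msb then 7 - r % 8 else r % 8))) := by
      rw [PySem.List.foldl_append_eq_flatMap, List.nil_append]
      refine (pvFlatMapCongr _ _ _ hband).trans ?_
      rw [pvFlat]
      simp only [pvGrid]
    simp only [render_to_bitmap_alt]
    rw [himg]
    have hlen : (pvGrid (8 * (data.length / 256))
        (fun r x => pvPx ((data.getD (r / 8 * 256 + x) 0) >>>
          (if msb then 7 - r % 8 else r % 8)))).length
        = 8 * (data.length / 256) := by
      simp [pvGrid]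
    rw [hlen]
  -- ── A side: closed form of render_to_bitmap, as in pvChunkLoop ──
  have hd' : (if data.length % 256 ≠ 0 then
      PySem.List.slice data none (some ((data.length / 256 * 256 : Nat) : Int))
    else data) = data.take (data.length / 256 * 256) := by
    split_ifs with h
    · rw [PySem.List.slice_to_natCast]
    · rw [List.take_of_length_le (by omega)]
  simp only [render_to_bitmap]
  rw [hd']
  rw [show (List.take (data.length / 256 * 256) data).length = data.length / 256 * 256 by
    rw [List.length_take]; omega]
  rw [show data.length / 256 * 256 / 256 = data.length / 256 by omega]
  have hrep : pvGrid (8 * (data.length / 256)) (fun _ _ => 0)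
      = List.replicate (8 * (data.length / 256)) (List.replicate 256 (0 : Int)) := by
    simp only [pvGrid, List.map_const', List.length_range]
  rw [← hrep, pvChunkLoop _ msb (data.length / 256) (data.length / 256) le_rfl]
  rw [hB]
  simp only [Prod.mk.injEq]
  refine ⟨?_, by norm_num, by norm_num⟩
  apply pvGrid_congr
  intro r x hr hx
  rw [if_pos hr]
  have hidx : r / 8 * 256 + x < data.length / 256 * 256 := by omega
  have hdg : (List.take (data.length / 256 * 256) data).getD (r / 8 * 256 + x) 0
      = data.getD (r / 8 * 256 + x) 0 := by
    simp [List.getD, hidx]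
  cases msb with
  | false => simp only [pvVal, pvPx, Bool.false_eq_true, if_false, hdg]
  | true => simp only [pvVal, pvPx, if_true, hdg]
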